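-- pv_equiv track=rewrite | github.com/zhi0219/STOCK | tools/promotion_gate_v2.py | _count_consecutive_approvals
-- ===== SOURCE A (Python) =====
-- from typing import Dict, List
--
-- def _count_consecutive_approvals(decisions: List[Dict[str, object]]) -> int:
--     count = 0
--     for entry in reversed(decisions):
--         if entry.get("decision") == "APPROVE":
--             count += 1
--         else:
--             break
--     return count
-- ===== SOURCE B (Python) =====
-- from typing import Dict, List
--
-- def _count_consecutive_approvals(decisions: List[Dict[str, object]]) -> int:
--     count = 0
--     for entry in decisions:
--         if entry.get("decision") == "APPROVE":
--             count += 1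
--         else:
--             count = 0
--     return count
-- ===== Notes on version B (the rewrite author's own statement) =====
-- stated objective: alternative
-- what changed: Forward single pass with a counter that resets to 0 on any non-APPROVE entry (no reversal, no break), instead of A's reversed scan with early break.
import Mathlib
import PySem

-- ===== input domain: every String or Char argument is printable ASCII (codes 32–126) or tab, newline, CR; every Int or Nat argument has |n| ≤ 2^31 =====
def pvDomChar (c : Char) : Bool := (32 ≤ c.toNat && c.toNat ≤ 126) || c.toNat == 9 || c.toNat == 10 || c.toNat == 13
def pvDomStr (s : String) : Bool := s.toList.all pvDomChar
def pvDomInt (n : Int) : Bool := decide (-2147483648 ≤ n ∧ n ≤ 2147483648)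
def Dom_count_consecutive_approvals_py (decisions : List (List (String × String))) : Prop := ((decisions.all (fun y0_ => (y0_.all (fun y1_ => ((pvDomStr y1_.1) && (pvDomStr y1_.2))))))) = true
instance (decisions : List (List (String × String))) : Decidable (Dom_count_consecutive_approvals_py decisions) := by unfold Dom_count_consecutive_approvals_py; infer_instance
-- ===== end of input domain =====

-- B replaces A's reversed scan with early break by a forward pass whose counter resets on a non-APPROVE entry (alternative decomposition, same cost).

-- ===== PORT A =====
-- A: count = 0; for entry in reversed(decisions): if APPROVE then count += 1 else break.
-- The loop with break is the structural recursion below applied to decisions.reverse.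
def pvLoopA : List (List (String × String)) → Int
  | [] => 0
  | e :: rest =>
    if (PySem.Dict.mk e).get? "decision" = some "APPROVE" then 1 + pvLoopA rest else 0

def count_consecutive_approvals_py (decisions : List (List (String × String))) : Int :=
  pvLoopA decisions.reverse

-- ===== PORT B =====
def count_consecutive_approvals_py_alt (decisions : List (List (String × String))) : Int :=
  decisions.foldl (fun count entry =>
    if (PySem.Dict.mk entry).get? "decision" = some "APPROVE" then count + 1 else 0) 0

-- ===== PRECONDITION & SPEC =====
def Spec_count_consecutive_approvals_py (decisions : List (List (String × String))) (out : Int) : Prop := out = count_consecutive_approvals_py_alt decisions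
instance (decisions : List (List (String × String))) (out : Int) : Decidable (Spec_count_consecutive_approvals_py decisions out) := by unfold Spec_count_consecutive_approvals_py; infer_instance

-- ===== CLAIM (what is proved, stated in full; the proofs are below) =====
def Claim_equal_count_consecutive_approvals_py : Prop := ∀ (decisions : List (List (String × String))), Dom_count_consecutive_approvals_py decisions → Spec_count_consecutive_approvals_py decisions (count_consecutive_approvals_py decisions)

-- ===== LEMMAS AND PROOFS =====
theorem pvLoopA_reverse_eq_foldl (l : List (List (String × String))) :
    pvLoopA l.reverse =
      l.foldl (fun count entry =>
        if (PySem.Dict.mk entry).get? "decision" = some "APPROVE" then count + 1 else 0) 0 := by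
  induction l using List.reverseRecOn with
  | nil => rfl
  | append_singleton l e ih =>
    rw [List.reverse_append, List.foldl_append]
    simp only [List.reverse_singleton, List.singleton_append, pvLoopA, List.foldl]
    rw [← ih]
    split_ifs with h
    · omega
    · rfl

-- ===== VERDICT (by name: the statement is the Claim_ definition above) =====
theorem count_consecutive_approvals_py_spec : Claim_equal_count_consecutive_approvals_py := by
  intro decisions _
  unfold Spec_count_consecutive_approvals_py count_consecutive_approvals_py count_consecutive_approvals_py_alt
  exact pvLoopA_reverse_eq_foldl decisions
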